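-- pv_equiv track=rewrite | github.com/eschuler23/ImageValidationPipeline | Image_Processing/Content_validation/ground_truth_pie_charts.py | _split_label_parts
-- ===== SOURCE A (Python) =====
-- from typing import Callable, List, Mapping, Optional, Sequence
--
-- def _split_label_parts(label: str) -> List[str]:
--     parts: List[str] = []
--     for chunk in label.split(";"):
--         for piece in chunk.split(","):
--             cleaned = piece.strip()
--             if cleaned:
--                 parts.append(cleaned)
--     return parts or [label.strip()]
-- ===== SOURCE B (Python) =====
-- def _split_label_parts(label):
--     parts = []
--     cur = []
--     for ch in label:
--         if ch == ";" or ch == ",":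
--             cleaned = "".join(cur).strip()
--             if cleaned:
--                 parts.append(cleaned)
--             cur = []
--         else:
--             cur.append(ch)
--     cleaned = "".join(cur).strip()
--     if cleaned:
--         parts.append(cleaned)
--     return parts or [label.strip()]
-- ===== Notes on version B (the rewrite author's own statement) =====
-- stated objective: alternative
-- what changed: Replaces the nested split(';')/split(',') loops with a single character-level scan that accumulates the current token and flushes it (stripped, if non-empty) at each separator.
import Mathlib
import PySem

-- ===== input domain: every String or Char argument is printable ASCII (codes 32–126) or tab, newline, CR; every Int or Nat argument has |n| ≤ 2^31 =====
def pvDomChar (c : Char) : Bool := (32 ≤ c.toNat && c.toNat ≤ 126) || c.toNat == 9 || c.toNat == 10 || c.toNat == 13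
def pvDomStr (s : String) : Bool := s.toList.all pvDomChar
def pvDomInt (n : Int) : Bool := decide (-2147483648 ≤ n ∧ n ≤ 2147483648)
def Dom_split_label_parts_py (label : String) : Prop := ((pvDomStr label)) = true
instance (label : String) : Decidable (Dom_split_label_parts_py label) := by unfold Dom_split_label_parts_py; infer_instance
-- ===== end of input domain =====

-- B replaces A's nested split(';')/split(',') loops by a single character scan with an
-- accumulated current token (objective: alternative decomposition, same cost).

-- ===== PORT A =====
-- body of A's inner `for piece in chunk.split(","):` loop
def pyInnerStep (parts : List String) (piece : List Char) : List String :=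
  let cleaned := PySem.Chars.strip piece
  if cleaned ≠ [] then parts ++ [String.ofList cleaned] else parts

-- body of A's outer `for chunk in label.split(";"):` loop
def pyOuterStep (parts : List String) (chunk : List Char) : List String :=
  (PySem.Chars.splitOn chunk [',']).foldl pyInnerStep parts

def split_label_parts_py (label : String) : List String :=
  let parts := (PySem.Chars.splitOn label.toList [';']).foldl pyOuterStep []
  if parts = [] then [PySem.Str.strip label] else parts

-- ===== PORT B =====
-- body of B's `for ch in label:` loop: flush the current token at a separator, else extend it
def altStep (st : List String × List Char) (ch : Char) : List String × List Char :=
  if ch == ';' || ch == ',' then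
    let cleaned := PySem.Chars.strip st.2
    (if cleaned ≠ [] then st.1 ++ [String.ofList cleaned] else st.1, [])
  else (st.1, st.2 ++ [ch])

def split_label_parts_py_alt (label : String) : List String :=
  let st := label.toList.foldl altStep ([], [])
  let cleaned := PySem.Chars.strip st.2
  let parts := if cleaned ≠ [] then st.1 ++ [String.ofList cleaned] else st.1
  if parts = [] then [PySem.Str.strip label] else parts

-- ===== PRECONDITION & SPEC =====
def Spec_split_label_parts_py (label : String) (out : List String) : Prop := out = split_label_parts_py_alt label
instance (label : String) (out : List String) : Decidable (Spec_split_label_parts_py label out) := by unfold Spec_split_label_parts_py; infer_instance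

-- ===== CLAIM (what is proved, stated in full; the proofs are below) =====
def Claim_equal_split_label_parts_py : Prop := ∀ (label : String), Dom_split_label_parts_py label → Spec_split_label_parts_py label (split_label_parts_py label)

-- ===== LEMMAS AND PROOFS =====

-- the stripped non-empty tokens of a list of raw pieces
def pvCollect (ps : List (List Char)) : List String :=
  ps.flatMap (fun q =>
    if PySem.Chars.strip q ≠ [] then [String.ofList (PySem.Chars.strip q)] else [])

theorem pvCollect_append (a b : List (List Char)) :
    pvCollect (a ++ b) = pvCollect a ++ pvCollect b := by
  simp [pvCollect]

-- PySem.Chars.splitOn.go on a one-character separator computes List.splitOnP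
theorem pvGo_spec (c : Char) (fuel : Nat) : ∀ (l cur : List Char) (acc : List (List Char)),
    l.length ≤ fuel →
    PySem.Chars.splitOn.go [c] fuel l cur acc
      = acc.reverse ++ (l.splitOnP (· == c)).modifyHead (cur.reverse ++ ·) := by
  induction fuel with
  | zero =>
    intro l cur acc h
    have hl : l = [] := List.length_eq_zero_iff.mp (Nat.le_zero.mp h)
    subst hl
    simp [PySem.Chars.splitOn.go, List.splitOnP_nil]
  | succ fuel ih =>
    intro l cur acc h
    cases l with
    | nil => simp [PySem.Chars.splitOn.go, List.splitOnP_nil]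
    | cons c' rest =>
      rw [PySem.Chars.splitOn.go]
      simp only [List.isPrefixOf_cons₂, List.isPrefixOf_nil_left, Bool.and_true, List.length_cons,
        List.drop_succ_cons, List.drop_zero]
      by_cases hc : c = c'
      · subst hc
        simp only [beq_self_eq_true, if_pos, List.length_nil, List.drop_zero]
        rw [ih rest [] (cur.reverse :: acc) (by simpa using h)]
        rw [List.splitOnP_cons]
        simp only [beq_self_eq_true, if_pos, List.modifyHead_cons, List.nil_append]
        rcases rest.splitOnP (· == c) with _ | ⟨hd, tl⟩
        · simp
        · simp
      · have hb : (c == c') = false := by simp [hc]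
        have hb' : (c' == c) = false := by simp [Ne.symm hc]
        rw [if_neg (by simp [hb])]
        rw [ih rest (c' :: cur) acc (by simpa using Nat.le_of_succ_le_succ h)]
        rw [List.splitOnP_cons]
        simp only [hb', Bool.false_eq_true, if_neg, reduceCtorEq, not_false_eq_true]
        rcases rest.splitOnP (· == c) with _ | ⟨hd, tl⟩
        · simp
        · simp

theorem pvSplitOn_singleton (cs : List Char) (c : Char) :
    PySem.Chars.splitOn cs [c] = cs.splitOnP (· == c) := by
  unfold PySem.Chars.splitOn
  rw [pvGo_spec c (cs.length + 1) cs [] [] (Nat.le_succ _)]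
  rcases h : cs.splitOnP (· == c) with _ | ⟨hd, tl⟩
  · exact absurd h (List.splitOnP_ne_nil _ _)
  · simp

theorem pvInner_spec (pieces : List (List Char)) : ∀ (parts : List String),
    pieces.foldl pyInnerStep parts = parts ++ pvCollect pieces := by
  induction pieces with
  | nil => intro parts; simp [pvCollect]
  | cons p ps ih =>
    intro parts
    simp only [List.foldl_cons, ih]
    show pyInnerStep parts p ++ _ = _
    by_cases h : PySem.Chars.strip p = []
    · simp [pyInnerStep, pvCollect, h]
    · simp [pyInnerStep, pvCollect, h]

theorem pvOuter_spec (chunks : List (List Char)) : ∀ (parts : List String),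
    chunks.foldl pyOuterStep parts
      = parts ++ pvCollect (chunks.flatMap (fun ch => ch.splitOnP (· == ','))) := by
  induction chunks with
  | nil => intro parts; simp [pvCollect]
  | cons ch chs ih =>
    intro parts
    simp only [List.foldl_cons, ih, List.flatMap_cons, pvCollect_append]
    rw [pyOuterStep, pvSplitOn_singleton, pvInner_spec]
    simp [List.append_assoc]

-- splitting on ';' then each chunk on ',' is splitting on both separators at once
theorem pvSplit_both (cs : List Char) :
    (cs.splitOnP (· == ';')).flatMap (fun ch => ch.splitOnP (· == ','))
      = cs.splitOnP (fun c => c == ';' || c == ',') := by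
  induction cs with
  | nil => simp [List.splitOnP_nil]
  | cons c rest ih =>
    rw [List.splitOnP_cons, List.splitOnP_cons (p := fun c => c == ';' || c == ',')]
    rcases h : rest.splitOnP (· == ';') with _ | ⟨hd, tl⟩
    · exact absurd h (List.splitOnP_ne_nil _ _)
    rcases h3 : rest.splitOnP (fun c => c == ';' || c == ',') with _ | ⟨hd3, tl3⟩
    · exact absurd h3 (List.splitOnP_ne_nil _ _)
    rw [h] at ih
    simp only [List.flatMap_cons] at ih
    rw [h3] at ih
    by_cases hs : c = ';'
    · simp [hs, List.splitOnP_cons, ih]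
    · by_cases hc : c = ','
      · have h1 : (c == ';') = false := by simp [hs]
        simp only [h1, Bool.false_eq_true, if_false, hc, List.modifyHead_cons, List.flatMap_cons,
          List.splitOnP_cons]
        simp [ih]
      · have h1 : (c == ';') = false := by simp [hs]
        have h2 : (c == ',') = false := by simp [hc]
        simp only [h1, h2, Bool.or_self, Bool.false_eq_true, if_false, List.modifyHead_cons,
          List.flatMap_cons, List.splitOnP_cons]
        rcases h4 : hd.splitOnP (· == ',') with _ | ⟨hd2, tl2⟩
        · exact absurd h4 (List.splitOnP_ne_nil _ _)
        simp only [h4, List.modifyHead_cons, List.cons_append]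
        rw [h4] at ih
        simp only [List.cons_append] at ih
        injection ih with e1 e2
        simp [e1, e2]

-- prefixing a separator-free run attaches it to the first chunk
theorem pvSplitOnP_sepfree_append (p : Char → Bool) (cur : List Char)
    (hcur : ∀ x ∈ cur, ¬ p x) : ∀ (l : List Char),
    (cur ++ l).splitOnP p = (l.splitOnP p).modifyHead (cur ++ ·) := by
  induction cur with
  | nil =>
    intro l
    rcases h : l.splitOnP p with _ | ⟨hd, tl⟩
    · exact absurd h (List.splitOnP_ne_nil _ _)
    · simp [h]
  | cons c rest ih =>
    intro l
    have hc : ¬ p c := hcur c (by simp)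
    have hrest : ∀ x ∈ rest, ¬ p x := fun x hx => hcur x (by simp [hx])
    rw [List.cons_append, List.splitOnP_cons, if_neg (by simpa using hc), ih hrest l]
    rcases h : l.splitOnP p with _ | ⟨hd, tl⟩
    · exact absurd h (List.splitOnP_ne_nil _ _)
    · simp

-- invariant of B's scan: flushing the final state yields parts ++ tokens of (cur ++ cs)
theorem pvScan_spec (cs : List Char) : ∀ (parts : List String) (cur : List Char),
    (∀ x ∈ cur, ¬ (x == ';' || x == ',') = true) →
    (let st := cs.foldl altStep (parts, cur);
     if PySem.Chars.strip st.2 ≠ [] then st.1 ++ [String.ofList (PySem.Chars.strip st.2)] else st.1)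
      = parts ++ pvCollect ((cur ++ cs).splitOnP (fun c => c == ';' || c == ',')) := by
  induction cs with
  | nil =>
    intro parts cur hcur
    simp only [List.foldl_nil, List.append_nil]
    rw [List.splitOnP_eq_single _ _ hcur]
    by_cases h : PySem.Chars.strip cur = [] <;> simp [pvCollect, h]
  | cons c rest ih =>
    intro parts cur hcur
    simp only [List.foldl_cons]
    by_cases hc : (c == ';' || c == ',') = true
    · rw [show altStep (parts, cur) c =
          (if PySem.Chars.strip cur ≠ [] then parts ++ [String.ofList (PySem.Chars.strip cur)] else parts, [])
          from by simp [altStep, hc]]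
      rw [ih _ [] (by simp)]
      rw [pvSplitOnP_sepfree_append _ cur hcur (c :: rest),
        List.splitOnP_cons, if_pos hc, List.modifyHead_cons, List.append_nil]
      rw [show pvCollect (cur :: rest.splitOnP (fun c => c == ';' || c == ',')) =
          (if PySem.Chars.strip cur ≠ [] then [String.ofList (PySem.Chars.strip cur)] else []) ++
            pvCollect (rest.splitOnP (fun c => c == ';' || c == ','))
          from by by_cases h : PySem.Chars.strip cur = [] <;> simp [pvCollect, h]]
      by_cases h : PySem.Chars.strip cur = [] <;> simp [h, List.append_assoc]
    · rw [show altStep (parts, cur) c = (parts, cur ++ [c]) from by simp [altStep, hc]]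
      rw [ih parts (cur ++ [c])
        (by intro x hx
            rcases List.mem_append.mp hx with h | h
            · exact hcur x h
            · simp only [List.mem_singleton] at h; subst h; simpa using hc)]
      simp [List.append_assoc]

-- ===== VERDICT (by name: the statement is the Claim_ definition above) =====
theorem split_label_parts_py_spec : Claim_equal_split_label_parts_py := by
  intro label _
  show split_label_parts_py label = split_label_parts_py_alt label
  unfold split_label_parts_py split_label_parts_py_alt
  rw [pvSplitOn_singleton, pvOuter_spec, pvSplit_both]
  have hb := pvScan_spec label.toList [] [] (by simp)
  simp only [List.nil_append] at hb
  rw [← hb]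
  rcases label.toList.foldl altStep ([], []) with ⟨ps, cur⟩
  by_cases h : PySem.Chars.strip cur = [] <;> simp [h]
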